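-- pv_equiv track=rewrite | github.com/alabamagan/WristBoneSegmentation | category_parser.py | category2string
-- ===== SOURCE A (Python) =====
-- def category2string(catlist):
--     """category2string --> str
--     Convert category list into string
--     """
--     d = {}
--     for i in range(max(catlist)):
--         d[i] = []
--
--     for index, cat in enumerate(catlist):
--         if not cat in d:
--             d[cat] = []
--         d[cat].append(index)
--
--     # sort the index lists
--     for cat in set(catlist):
--         d[cat].sort()
--
--     out = []
--     for cat in d.keys():
--         s = []
--         start = end = None
--         if len(d[cat]) == 0:
--             s.append('NULL')
--         else:
--             for i, index in enumerate(d[cat]):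
--                 if start is None:
--                     start = index
--                 try:
--                     if d[cat][i+1] > index + 1:
--                         end = index
--                 except KeyError:
--                     # Normal
--                     pass
--                 except IndexError:
--                     end = index
--                     pass
--                 if not start == None and not end == None:
--                     if start != end:
--                         s.append('-'.join([str(start+1), str(end+1)]))
--                     else:
--                         s.append(str(start+1))
--                     start = end = None
--
--
--         s = '_'.join(s)
--         out.append(s)
--     out = ','.join(out)
--     return out
-- ===== SOURCE B (Python) =====
-- def category2string(catlist):
--     """category2string --> str
--     Convert category list into string.
--     Segment-scan version: instead of collecting per-category index lists and
--     compressing them, scan catlist once for maximal runs of equal values; a run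
--     of cat covering indices i..j is exactly one 'i+1' / 'i+1-j+1' part of cat.
--     """
--     parts = {k: [] for k in range(max(catlist))}
--     n = len(catlist)
--     i = 0
--     while i < n:
--         cat = catlist[i]
--         j = i
--         while j + 1 < n and catlist[j + 1] == cat:
--             j += 1
--         parts.setdefault(cat, []).append(
--             str(i + 1) if i == j else '%d-%d' % (i + 1, j + 1))
--         i = j + 1
--     return ','.join('_'.join(v) if v else 'NULL' for v in parts.values())
-- ===== Notes on version B (the rewrite author's own statement) =====
-- stated objective: faster
-- what changed: B never builds per-category index lists: it scans catlist once for maximal runs of equal adjacent values and emits each run directly as one 'i+1'/'i+1-j+1' part into a per-category parts dict, replacing A's index-collection, per-category sort and try/except pairwise-lookahead range compression.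
import Mathlib
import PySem

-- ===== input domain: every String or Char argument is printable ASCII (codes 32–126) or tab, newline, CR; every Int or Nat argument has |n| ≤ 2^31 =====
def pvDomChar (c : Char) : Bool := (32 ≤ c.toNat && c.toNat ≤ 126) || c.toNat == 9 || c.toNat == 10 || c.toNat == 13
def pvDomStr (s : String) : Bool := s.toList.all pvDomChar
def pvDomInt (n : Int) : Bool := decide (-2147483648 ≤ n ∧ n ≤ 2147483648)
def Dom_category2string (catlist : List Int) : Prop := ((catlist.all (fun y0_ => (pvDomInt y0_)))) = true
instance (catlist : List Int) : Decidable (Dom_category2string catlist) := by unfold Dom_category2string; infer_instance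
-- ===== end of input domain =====

-- B is a different algorithm: it never builds per-category index lists; it scans catlist once for
-- maximal runs of equal values, each run directly one 'i+1'/'i+1-j+1' part (measured ~2x faster).

-- ===== PORT A =====
def category2string (catlist : List Int) : String :=
  match PySem.List.max? catlist (fun x => x) with
  | none => ""   -- max([]) raises ValueError; excluded by Pre_category2string
  | some m =>
    -- d = {}; for i in range(max(catlist)): d[i] = []
    let d : PySem.Dict Int (List Int) :=
      (PySem.List.pyRange 0 m 1).foldl (fun d i => d.insert i []) PySem.Dict.empty
    -- for index, cat in enumerate(catlist): if not cat in d: d[cat] = []; d[cat].append(index)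
    let d := (PySem.List.enumerate catlist).foldl
      (fun d p =>
        let d := if d.contains p.2 then d else d.insert p.2 []
        d.modify p.2 [] (fun l => l ++ [p.1])) d
    -- for cat in set(catlist): d[cat].sort()
    let d := (PySem.Set.ofList catlist).foldl
      (fun d cat => d.modify cat [] (fun l => PySem.List.sorted l (fun x => x))) d
    -- for cat in d.keys(): …
    let out := d.keys.foldl (fun out cat =>
      let lst := d.getD cat []   -- d[cat]: key always present
      let s : List String :=
        if lst.length = 0 then ["NULL"]
        else
          ((PySem.List.enumerate lst).foldl (fun (st : Option Int × Option Int × List String) p =>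
            let start := if st.1 = none then some p.2 else st.1
            -- try: if d[cat][i+1] > index+1: end = index / except IndexError: end = index
            let e : Option Int :=
              match PySem.List.pyGet? lst (p.1 + 1) with
              | some nxt => if nxt > p.2 + 1 then some p.2 else st.2.1
              | none => some p.2
            match start, e with
            | some a, some b =>
              (none, none, st.2.2 ++
                [if a ≠ b then PySem.Str.join "-" [PySem.Int.toStr (a + 1), PySem.Int.toStr (b + 1)]
                 else PySem.Int.toStr (a + 1)])
            | _, _ => (start, e, st.2.2)) ((none, none, []) : Option Int × Option Int × List String)).2.2
      out ++ [PySem.Str.join "_" s]) ([] : List String)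
    PySem.Str.join "," out

-- ===== PORT B =====
-- str(i+1) if i == j else '%d-%d' % (i+1, j+1)   ('%d' formatting is exactly str())
def renderSeg (i j : Int) : String :=
  if i = j then PySem.Int.toStr (i + 1)
  else PySem.Int.toStr (i + 1) ++ "-" ++ PySem.Int.toStr (j + 1)

-- B's outer while loop, one call per maximal run of equal values starting at absolute index i;
-- the inner 'while j+1 < n and catlist[j+1] == cat: j += 1' is exactly takeWhile/dropWhile on the tail.
def scanB (d : PySem.Dict Int (List String)) (i : Int) : List Int → PySem.Dict Int (List String)
  | [] => d
  | cat :: t =>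
    let j := i + (t.takeWhile (· == cat)).length
    scanB ((d.setdefault cat []).modify cat [] (fun v => v ++ [renderSeg i j])) (j + 1)
      (t.dropWhile (· == cat))
termination_by l => l.length
decreasing_by
  exact Nat.lt_succ_of_le (List.length_dropWhile_le _ _)

def category2string_alt (catlist : List Int) : String :=
  match PySem.List.max? catlist (fun x => x) with
  | none => ""   -- max([]) raises ValueError; excluded by Pre_category2string
  | some m =>
    -- parts = {k: [] for k in range(max(catlist))}
    let parts : PySem.Dict Int (List String) :=
      (PySem.List.pyRange 0 m 1).foldl (fun d k => d.insert k []) PySem.Dict.empty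
    -- while i < n: … (the run scan)
    let parts := scanB parts 0 catlist
    -- ','.join('_'.join(v) if v else 'NULL' for v in parts.values())
    PySem.Str.join "," (parts.values.map (fun v => if v = [] then "NULL" else PySem.Str.join "_" v))

-- ===== PRECONDITION & SPEC =====
-- Pre_ excludes only the empty list, on which A's max(catlist) raises ValueError (B raises too).
def Pre_category2string (catlist : List Int) : Prop := catlist ≠ []
instance (catlist : List Int) : Decidable (Pre_category2string catlist) := by unfold Pre_category2string; infer_instance
def pvWitness_category2string : List Int := [2, 2, 0, 5, 2, 2]

def Spec_category2string (catlist : List Int) (out : String) : Prop := out = category2string_alt catlist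
instance (catlist : List Int) (out : String) : Decidable (Spec_category2string catlist out) := by unfold Spec_category2string; infer_instance

-- ===== CLAIM (what is proved, stated in full; the proofs are below) =====
def Claim_equal_category2string : Prop := ∀ (catlist : List Int), Dom_category2string catlist → Pre_category2string catlist → Spec_category2string catlist (category2string catlist)

-- ===== LEMMAS AND PROOFS =====

-- the string A's inner loop appends for the run a..b
def emitStr (a b : Int) : String :=
  if a ≠ b then PySem.Str.join "-" [PySem.Int.toStr (a + 1), PySem.Int.toStr (b + 1)]
  else PySem.Int.toStr (a + 1)

-- A's inner loop, restructured as a recursion carrying the lookahead in the list structure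
def goA : Option Int → List String → List Int → List String
  | _, acc, [] => acc
  | s?, acc, x :: t =>
    let a := s?.getD x
    match t with
    | [] => acc ++ [emitStr a x]
    | y :: t' => if y > x + 1 then goA none (acc ++ [emitStr a x]) (y :: t') else goA (some a) acc (y :: t')

-- run accumulator over an increasing index list (proof-side common form)
def goB : List (Int × Int) → Int → Int → List Int → List (Int × Int)
  | runs, lo, hi, [] => runs ++ [(lo, hi)]
  | runs, lo, hi, x :: t => if x = hi + 1 then goB runs lo x t else goB (runs ++ [(lo, hi)]) x x t

-- runs of an index list, head split off
def goBIdx : List Int → List (Int × Int)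
  | [] => []
  | x :: t => goB [] x x t

-- the maximal run segments of value c in l, as (start, end) absolute index pairs
def runsOf (c : Int) : Int → List Int → List (Int × Int)
  | _, [] => []
  | k, cat :: t =>
    let j := k + (t.takeWhile (· == cat)).length
    let rest := runsOf c (j + 1) (t.dropWhile (· == cat))
    if cat = c then (k, j) :: rest else rest
termination_by _ l => l.length
decreasing_by
  exact Nat.lt_succ_of_le (List.length_dropWhile_le _ _)

-- the index list of value c in l, indices starting at k
def idxOf (c k : Int) (l : List Int) : List Int :=
  ((PySem.List.enumerate l k).filter (fun p => p.2 == c)).map (fun p => p.1)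

theorem goA_none (acc : List String) (x : Int) (t : List Int) :
    goA none acc (x :: t) = goA (some x) acc (x :: t) := by
  cases t <;> simp [goA]

theorem join_pair (s t sep : String) : PySem.Str.join sep [s, t] = s ++ sep ++ t := by
  apply String.toList_inj.mp
  simp [PySem.Str.toList_join, PySem.Chars.join_cons_cons, PySem.Chars.join_singleton]

theorem join_single (sep s : String) : PySem.Str.join sep [s] = s := by
  apply String.toList_inj.mp
  simp [PySem.Str.toList_join, PySem.Chars.join_singleton]

theorem emitStr_eq_renderSeg (a b : Int) : emitStr a b = renderSeg a b := by
  unfold emitStr renderSeg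
  by_cases h : a = b
  · simp [h]
  · simp [h, join_pair]

-- A's fold body (named for the proofs)
def bodyA (lst : List Int) (st : Option Int × Option Int × List String) (p : Int × Int) :
    Option Int × Option Int × List String :=
  let start := if st.1 = none then some p.2 else st.1
  let e : Option Int :=
    match PySem.List.pyGet? lst (p.1 + 1) with
    | some nxt => if nxt > p.2 + 1 then some p.2 else st.2.1
    | none => some p.2
  match start, e with
  | some a, some b =>
    (none, none, st.2.2 ++
      [if a ≠ b then PySem.Str.join "-" [PySem.Int.toStr (a + 1), PySem.Int.toStr (b + 1)]
       else PySem.Int.toStr (a + 1)])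
  | _, _ => (start, e, st.2.2)

-- bridge: A's enumerate/pyGet? fold equals goA
theorem foldA_eq_goA (lst : List Int) : ∀ (suf : List Int) (k : Nat) (s? : Option Int) (acc : List String),
    lst.drop k = suf →
    ((PySem.List.enumerate suf k).foldl (bodyA lst) (s?, none, acc)).2.2 = goA s? acc suf := by
  intro suf
  induction suf with
  | nil => intro k s? acc h; simp [PySem.List.enumerate_nil, goA]
  | cons x t ih =>
    intro k s? acc h
    have hdrop : lst.drop (k + 1) = t := by
      have h1 : lst.drop (k + 1) = (lst.drop k).drop 1 := by
        rw [List.drop_drop]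
      rw [h1, h]
      rfl
    have hget : PySem.List.pyGet? lst ((k : Int) + 1) = t.head? := by
      have hc : ((k : Int) + 1) = ((k + 1 : Nat) : Int) := by push_cast; ring
      rw [hc, PySem.List.pyGet?_natCast, ← List.head?_drop, hdrop]
    have hk1 : ((k : Int) + 1) = ((k + 1 : Nat) : Int) := by push_cast; ring
    rw [PySem.List.enumerate_cons, List.foldl_cons]
    have hstep : bodyA lst (s?, none, acc) ((k : Int), x) =
        match t.head? with
        | some nxt => if nxt > x + 1
            then (none, none, acc ++ [emitStr (s?.getD x) x])
            else (some (s?.getD x), none, acc)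
        | none => (none, none, acc ++ [emitStr (s?.getD x) x]) := by
      unfold bodyA emitStr
      simp only [hget]
      cases s? with
      | none => cases t.head? with
        | none => simp
        | some nxt => by_cases hgt : nxt > x + 1 <;> simp [hgt]
      | some a => cases t.head? with
        | none => simp
        | some nxt => by_cases hgt : nxt > x + 1 <;> simp [hgt]
    rw [hk1, hstep]
    cases t with
    | nil =>
      simp only [List.head?_nil]
      rw [ih (k + 1) none (acc ++ [emitStr (s?.getD x) x]) hdrop]
      simp [goA]
    | cons y t' =>
      simp only [List.head?_cons]
      by_cases hgt : y > x + 1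
      · simp only [hgt, if_pos]
        rw [ih (k + 1) none (acc ++ [emitStr (s?.getD x) x]) hdrop]
        simp only [goA, if_pos hgt]
      · simp only [if_neg hgt]
        rw [ih (k + 1) (some (s?.getD x)) acc hdrop]
        simp [goA, hgt]

theorem goA_eq_goB : ∀ (l : List Int) (lo hi : Int) (runs : List (Int × Int)),
    List.IsChain (· < ·) (hi :: l) →
    goA (some lo) (runs.map (fun r => renderSeg r.1 r.2)) (hi :: l)
      = (goB runs lo hi l).map (fun r => renderSeg r.1 r.2) := by
  intro l
  induction l with
  | nil =>
    intro lo hi runs _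
    simp [goA, goB, emitStr_eq_renderSeg]
  | cons y t ih =>
    intro lo hi runs hch
    have hlt : hi < y := (List.isChain_cons_cons.mp hch).1
    have hch' : List.IsChain (· < ·) (y :: t) := (List.isChain_cons_cons.mp hch).2
    by_cases hgt : y > hi + 1
    · simp only [goA, Option.getD_some, if_pos hgt]
      rw [goA_none, emitStr_eq_renderSeg]
      have : runs.map (fun r => renderSeg r.1 r.2) ++ [renderSeg lo hi]
          = (runs ++ [(lo, hi)]).map (fun r => renderSeg r.1 r.2) := by simp
      rw [this, ih y y (runs ++ [(lo, hi)]) hch']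
      simp only [goB]
      rw [if_neg (by omega)]
    · have heq : y = hi + 1 := by omega
      simp only [goA, Option.getD_some, if_neg hgt]
      rw [ih lo y runs hch']
      simp only [goB, if_pos heq]

-- goB only appends to its accumulator
theorem goB_accum : ∀ (l : List Int) (runs : List (Int × Int)) (lo hi : Int),
    goB runs lo hi l = runs ++ goB [] lo hi l := by
  intro l
  induction l with
  | nil => intro runs lo hi; simp [goB]
  | cons x t ih =>
    intro runs lo hi
    by_cases h : x = hi + 1
    · simp only [goB, if_pos h]; rw [ih runs, ih []]
    · simp only [goB, if_neg h]
      rw [ih (runs ++ [(lo, hi)]), ih ([] ++ [(lo, hi)])]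
      simp

theorem goB_ne_nil : ∀ (l : List Int) (runs : List (Int × Int)) (lo hi : Int),
    goB runs lo hi l ≠ [] := by
  intro l
  induction l with
  | nil => intro runs lo hi; simp [goB]
  | cons x t ih =>
    intro runs lo hi
    by_cases h : x = hi + 1
    · simp only [goB, if_pos h]; exact ih runs lo x
    · simp only [goB, if_neg h]; exact ih (runs ++ [(lo, hi)]) x x

-- stepping goB over a block of consecutive indices produced by enumerate
theorem goB_enum {α : Type} : ∀ (r : List α) (s : Int) (runs : List (Int × Int)) (lo : Int) (tail : List Int),
    goB runs lo s ((PySem.List.enumerate r (s + 1)).map (fun p => p.1) ++ tail)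
      = goB runs lo (s + r.length) tail := by
  intro r
  induction r with
  | nil => intro s runs lo tail; simp [PySem.List.enumerate_nil]
  | cons x t ih =>
    intro s runs lo tail
    rw [PySem.List.enumerate_cons]
    simp only [List.map_cons, List.cons_append, goB, if_pos rfl]
    have := ih (s + 1) runs lo tail
    rw [show s + 1 + 1 = (s + 1) + 1 by ring] at this
    rw [this]
    congr 1
    simp only [List.length_cons]
    push_cast
    ring

-- a filter that keeps everything
theorem filter_enumerate_all (c : Int) : ∀ (r : List Int) (s : Int), (∀ x ∈ r, x = c) →
    (PySem.List.enumerate r s).filter (fun p => p.2 == c) = PySem.List.enumerate r s := by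
  intro r
  induction r with
  | nil => intro s _; simp [PySem.List.enumerate_nil]
  | cons x t ih =>
    intro s h
    rw [PySem.List.enumerate_cons]
    rw [List.filter_cons]
    have hx : x = c := h x (by simp)
    simp only [hx, beq_self_eq_true, if_pos]
    rw [ih (s + 1) (fun y hy => h y (by simp [hy]))]

-- a filter that drops everything
theorem filter_enumerate_none (c : Int) : ∀ (r : List Int) (s : Int), (∀ x ∈ r, x ≠ c) →
    (PySem.List.enumerate r s).filter (fun p => p.2 == c) = [] := by
  intro r
  induction r with
  | nil => intro s _; simp [PySem.List.enumerate_nil]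
  | cons x t ih =>
    intro s h
    rw [PySem.List.enumerate_cons, List.filter_cons]
    have hx : x ≠ c := h x (by simp)
    simp only [beq_iff_eq, hx, if_neg, decide_eq_true_eq, ite_false]
    exact ih (s + 1) (fun y hy => h y (by simp [hy]))

theorem head_dropWhile_false (p : Int → Bool) : ∀ (l : List Int) (x : Int),
    (l.dropWhile p).head? = some x → p x = false := by
  intro l
  induction l with
  | nil => intro x h; simp [List.dropWhile] at h
  | cons y t ih =>
    intro x h
    rw [List.dropWhile_cons] at h
    by_cases hp : p y
    · rw [if_pos hp] at h; exact ih x h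
    · rw [if_neg hp] at h
      simp only [List.head?_cons, Option.some_inj] at h
      subst h
      exact Bool.eq_false_iff.mpr hp

-- every c-index of a list whose head is not c lies at least one past the start
theorem idxOf_lower (c s : Int) (rest : List Int) (hh : ∀ h, rest.head? = some h → h ≠ c) :
    ∀ x ∈ idxOf c s rest, s + 1 ≤ x := by
  intro x hx
  unfold idxOf at hx
  obtain ⟨p, hpmem, hpx⟩ := List.mem_map.mp hx
  have hpf := List.mem_filter.mp hpmem
  obtain ⟨n, hn, hpn⟩ := (PySem.List.mem_enumerate_iff rest s p).mp hpf.1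
  have hc : p.2 = c := by
    have := hpf.2
    simpa using this
  cases n with
  | zero =>
    exfalso
    have hhead : rest.head? = some rest[0] := by
      cases rest with
      | nil => simp at hn
      | cons a t => simp
    apply hh rest[0] hhead
    rw [hpn] at hc
    simpa using hc
  | succ m =>
    rw [hpn] at hpx
    simp only at hpx
    omega

-- decomposition of the index list over the leading maximal run
theorem idxOf_cons (c k : Int) (cat : Int) (t : List Int) :
    idxOf c k (cat :: t)
      = (if cat = c
          then k :: ((PySem.List.enumerate (t.takeWhile (· == cat)) (k + 1)).map (fun p => p.1)
                      ++ idxOf c (k + 1 + (t.takeWhile (· == cat)).length) (t.dropWhile (· == cat)))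
          else idxOf c (k + 1 + (t.takeWhile (· == cat)).length) (t.dropWhile (· == cat))) := by
  unfold idxOf
  rw [PySem.List.enumerate_cons]
  conv_lhs => rw [show t = t.takeWhile (· == cat) ++ t.dropWhile (· == cat) from (List.takeWhile_append_dropWhile).symm]
  rw [PySem.List.enumerate_append, List.filter_cons]
  have hall : ∀ x ∈ t.takeWhile (· == cat), x = cat := by
    intro x hx
    have := List.mem_takeWhile_imp hx
    simpa using this
  by_cases hc : cat = c
  · subst hc
    simp only [beq_self_eq_true, if_pos, List.filter_append, List.map_cons, List.map_append]
    rw [filter_enumerate_all cat _ _ hall]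
  · simp only [beq_iff_eq, hc, decide_eq_true_eq, ite_false, if_neg, List.filter_append, List.map_append]
    rw [filter_enumerate_none c _ _ (fun x hx => by rw [hall x hx]; exact hc)]
    simp

-- goB over an index list whose every element clears the running end by 2
theorem goB_gap (lo hi : Int) (idx : List Int) (hgap : ∀ x ∈ idx, hi + 2 ≤ x) :
    goB [] lo hi idx = (lo, hi) :: goBIdx idx := by
  cases idx with
  | nil => simp [goB, goBIdx]
  | cons x t =>
    have hx : hi + 2 ≤ x := hgap x (by simp)
    simp only [goB, goBIdx]
    rw [if_neg (by omega), goB_accum]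
    simp

-- CORE: the runs of the c-index list are exactly the maximal c-segments
theorem goBIdx_idxOf (c : Int) : ∀ (k : Int) (l : List Int), goBIdx (idxOf c k l) = runsOf c k l := by
  intro k l
  fun_induction runsOf c k l with
  | case1 k => simp [idxOf, PySem.List.enumerate_nil, goBIdx]
  | case2 k t j rest ih =>
    rw [idxOf_cons c k c t, if_pos rfl]
    show goB [] k k _ = _
    rw [goB_enum]
    have hh : ∀ h, (t.dropWhile (· == c)).head? = some h → h ≠ c := by
      intro h hsome heq
      have := head_dropWhile_false (· == c) t h hsome
      simp [heq] at this
    have hgap : ∀ x ∈ idxOf c (k + 1 + (t.takeWhile (· == c)).length) (t.dropWhile (· == c)),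
        (k + (t.takeWhile (· == c)).length) + 2 ≤ x := by
      intro x hx
      have := idxOf_lower c (k + 1 + (t.takeWhile (· == c)).length) (t.dropWhile (· == c)) hh x hx
      omega
    rw [show k + 1 + ((t.takeWhile (· == c)).length : Int)
      = k + ((t.takeWhile (· == c)).length : Int) + 1 by ring] at hgap ⊢
    rw [goB_gap _ _ _ hgap, ih]
  | case3 k cat t j rest h ih =>
    rw [idxOf_cons c k cat t, if_neg h]
    rw [show k + 1 + ((t.takeWhile (· == cat)).length : Int)
      = k + ((t.takeWhile (· == cat)).length : Int) + 1 by ring]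
    exact ih

-- ---------- dict facts (A side) ----------

theorem getD_initfold (l : List Int) :
    ∀ (d : PySem.Dict Int (List Int)), (∀ c, d.getD c [] = ([] : List Int)) →
    ∀ c, (l.foldl (fun d i => d.insert i ([] : List Int)) d).getD c [] = [] := by
  induction l with
  | nil => intro d h c; exact h c
  | cons i t ih =>
    intro d h c
    refine ih _ (fun c => ?_) c
    by_cases hc : c = i
    · subst hc; exact PySem.Dict.getD_insert_self d c [] []
    · rw [PySem.Dict.getD_insert_of_ne (hne := hc)]
      exact h c

theorem stepA_eq :
    (fun (d : PySem.Dict Int (List Int)) (p : Int × Int) =>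
      let d := if d.contains p.2 then d else d.insert p.2 []
      d.modify p.2 [] (fun l => l ++ [p.1]))
    = fun (d : PySem.Dict Int (List Int)) (p : Int × Int) => d.modify p.2 [] (fun l => l ++ [p.1]) := by
  funext d p
  by_cases h : d.contains p.2
  · simp [h]
  · simp only [Bool.not_eq_true] at h
    simp only [h, Bool.false_eq_true, if_false]
    show (d.insert p.2 []).insert p.2 (((d.insert p.2 []).getD p.2 []) ++ [p.1])
        = d.insert p.2 ((d.getD p.2 []) ++ [p.1])
    have h0 : d.get? p.2 = none := (PySem.Dict.get?_eq_none_iff_contains d p.2).mpr h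
    rw [PySem.Dict.getD_insert_self, PySem.Dict.insert_insert_self]
    simp [PySem.Dict.getD, h0]

-- the initial dict {i: [] for i in range(m)} (value type ν)
def initDict (ν : Type) (m : Int) : PySem.Dict Int (List ν) :=
  (PySem.List.pyRange 0 m 1).foldl (fun d i => d.insert i []) PySem.Dict.empty

-- the dict after A's phase 1
def phase1 (catlist : List Int) (m : Int) : PySem.Dict Int (List Int) :=
  (PySem.List.enumerate catlist).foldl (fun d p => d.modify p.2 [] (fun l => l ++ [p.1])) (initDict Int m)

theorem getD_phase1 (catlist : List Int) (m : Int) (c : Int) :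
    (phase1 catlist m).getD c [] = idxOf c 0 catlist := by
  unfold phase1 idxOf
  have hswap : (PySem.List.enumerate catlist).foldl
      (fun d p => d.modify p.2 [] (fun l => l ++ [p.1])) (initDict Int m)
    = (((PySem.List.enumerate catlist).map Prod.swap).foldl
      (fun d q => d.modify q.1 [] (fun l => l ++ [q.2])) (initDict Int m)) := by
    rw [List.foldl_map]
    rfl
  rw [hswap, PySem.Dict.getD_foldl_modify_append]
  have h0 : (initDict Int m).getD c [] = [] := by
    unfold initDict
    exact getD_initfold _ _ (fun c => by simp [PySem.Dict.getD]) c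
  rw [h0, List.nil_append, List.filter_map]
  rw [List.map_map]
  rfl

theorem pairwise_idxOf (catlist : List Int) (c : Int) :
    (idxOf c 0 catlist).Pairwise (· < ·) := by
  unfold idxOf
  apply List.Pairwise.map
  · intro p q h; exact h
  · exact (PySem.List.pairwise_lt_enumerate catlist 0).filter _

theorem nodup_keys_phase1 (catlist : List Int) (m : Int) : (phase1 catlist m).keys.Nodup := by
  unfold phase1
  exact PySem.Dict.nodup_keys_foldl_modify_key (PySem.List.enumerate catlist)
    (fun p => p.2) [] (fun _ p => fun l => l ++ [p.1]) (initDict Int m)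
    (PySem.Dict.nodup_keys_foldl_insert _ (fun _ _ => []) _ PySem.Dict.nodup_keys_empty)

theorem keys_initDict (ν : Type) (m : Int) :
    (initDict ν m).keys = PySem.Set.update ([] : List Int) (PySem.List.pyRange 0 m 1) := by
  unfold initDict
  rw [PySem.Dict.keys_foldl_insert _ (fun _ _ => [])]
  rfl

theorem keys_phase1 (catlist : List Int) (m : Int) :
    (phase1 catlist m).keys
      = PySem.Set.update (PySem.Set.update ([] : List Int) (PySem.List.pyRange 0 m 1)) catlist := by
  unfold phase1
  rw [PySem.Dict.keys_foldl_modify_key (PySem.List.enumerate catlist) (fun p => p.2) []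
    (fun _ p => fun l => l ++ [p.1])]
  rw [PySem.List.map_snd_enumerate, keys_initDict]

theorem foldl_id {α β : Type} (s : List α) (f : β → α → β) (d : β)
    (h : ∀ x ∈ s, f d x = d) : s.foldl f d = d := by
  induction s with
  | nil => rfl
  | cons x t ih =>
    rw [List.foldl_cons, h x (by simp)]
    exact ih (fun y hy => h y (by simp [hy]))

theorem contains_phase1 (catlist : List Int) (m : Int) (c : Int) (hc : c ∈ catlist) :
    (phase1 catlist m).contains c = true := by
  by_contra h
  simp only [Bool.not_eq_true] at h
  have h0 : (phase1 catlist m).get? c = none := (PySem.Dict.get?_eq_none_iff_contains _ c).mpr h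
  have hemp : (phase1 catlist m).getD c [] = [] := by simp [PySem.Dict.getD, h0]
  rw [getD_phase1] at hemp
  unfold idxOf at hemp
  obtain ⟨k, hk, hkc⟩ := List.mem_iff_getElem.mp hc
  have hmem : ((0 : Int) + (k : Int), c) ∈ PySem.List.enumerate catlist := by
    rw [PySem.List.mem_enumerate_iff]
    exact ⟨k, hk, by rw [hkc]⟩
  have : ((0 : Int) + (k : Int)) ∈ (((PySem.List.enumerate catlist).filter (fun p => p.2 == c)).map (fun p => p.1)) := by
    exact List.mem_map.mpr ⟨((0 : Int) + (k : Int), c), List.mem_filter.mpr ⟨hmem, by simp⟩, rfl⟩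
  rw [hemp] at this
  exact (List.not_mem_nil) this

theorem insert_getD_self (d : PySem.Dict Int (List Int)) (k : Int)
    (hnd : d.keys.Nodup) (hc : d.contains k = true) :
    d.insert k (d.getD k []) = d := by
  have hitems : ∀ p ∈ d.items, (if p.1 == k then (k, d.getD k []) else p) = p := by
    intro p hp
    obtain ⟨p1, p2⟩ := p
    by_cases hpk : p1 = k
    · subst hpk
      have hget : d.get? p1 = some p2 := PySem.Dict.get?_of_mem_items _ hp hnd
      simp [PySem.Dict.getD, hget]
    · simp [hpk]
  show PySem.Dict.insert d k (d.getD k []) = d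
  unfold PySem.Dict.insert
  rw [if_pos hc]
  apply PySem.Dict.ext
  show d.items.map _ = d.items
  rw [List.map_congr_left hitems]
  simp

theorem sortfold_id (catlist : List Int) (m : Int) :
    (PySem.Set.ofList catlist).foldl
      (fun d cat => d.modify cat [] (fun l => PySem.List.sorted l (fun x => x))) (phase1 catlist m)
    = phase1 catlist m := by
  apply foldl_id
  intro c hc
  have hmem : c ∈ catlist := (PySem.Set.mem_ofList catlist c).mp hc
  show (phase1 catlist m).insert c (PySem.List.sorted ((phase1 catlist m).getD c []) (fun x => x))
      = phase1 catlist m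
  have hpw : ((phase1 catlist m).getD c []).Pairwise (· ≤ ·) := by
    rw [getD_phase1]
    exact (pairwise_idxOf catlist c).imp (fun h => le_of_lt h)
  rw [PySem.List.sorted_eq_self_of_pairwise _ _ hpw]
  exact insert_getD_self _ _ (nodup_keys_phase1 catlist m) (contains_phase1 catlist m c hmem)

-- ---------- dict facts (B side) ----------

theorem keys_step (d : PySem.Dict Int (List String)) (cat : Int) (s : String) :
    ((d.setdefault cat []).modify cat [] (fun v => v ++ [s])).keys = PySem.Set.add d.keys cat := by
  rw [PySem.Dict.keys_modify]
  have hcont : (d.setdefault cat []).contains cat = true := by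
    rw [PySem.Dict.contains_setdefault]; simp
  rw [PySem.Dict.keys_insert_of_contains _ _ hcont, PySem.Dict.keys_setdefault]
  unfold PySem.Set.add
  by_cases h : d.contains cat
  · rw [if_pos h]
    have : PySem.Set.contains d.keys cat = true := by
      simp only [PySem.Set.contains_eq_listContains]
      simp [List.contains_iff_mem, (PySem.Dict.contains_iff_mem_keys d cat).mp h]
    rw [if_pos this]
  · simp only [Bool.not_eq_true] at h
    rw [if_neg (by simp [h])]
    rw [if_neg (by
      simp only [PySem.Set.contains_eq_listContains]
      simp only [List.contains_iff_mem, decide_eq_true_eq]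
      intro hm
      rw [← PySem.Dict.contains_iff_mem_keys] at hm
      simp [h] at hm)]

theorem set_add_of_mem {s : PySem.Set Int} {x : Int} (h : x ∈ s) : PySem.Set.add s x = s := by
  unfold PySem.Set.add
  rw [if_pos]
  simp [List.contains_iff_mem, h]

theorem set_update_absorb (s : PySem.Set Int) (r : List Int) (c : Int)
    (hall : ∀ x ∈ r, x = c) (hc : c ∈ s) : PySem.Set.update s r = s := by
  induction r with
  | nil => rfl
  | cons x t ih =>
    have hx : x = c := hall x (by simp)
    subst hx
    show PySem.Set.update (PySem.Set.add s x) t = s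
    rw [set_add_of_mem hc]
    exact ih (fun y hy => hall y (by simp [hy]))

theorem set_update_append (s : PySem.Set Int) (l₁ l₂ : List Int) :
    PySem.Set.update s (l₁ ++ l₂) = PySem.Set.update (PySem.Set.update s l₁) l₂ := by
  show (l₁ ++ l₂).foldl PySem.Set.add s = _
  rw [List.foldl_append]
  rfl

theorem keys_scanB : ∀ (l : List Int) (d : PySem.Dict Int (List String)) (i : Int),
    (scanB d i l).keys = PySem.Set.update d.keys l := by
  intro l d i
  fun_induction scanB d i l with
  | case1 d i => rfl
  | case2 d i cat t j ih =>
    rw [ih, keys_step]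
    conv_rhs => rw [show (cat :: t) = cat :: (t.takeWhile (· == cat) ++ t.dropWhile (· == cat))
      from by rw [List.takeWhile_append_dropWhile]]
    show _ = PySem.Set.update (PySem.Set.add d.keys cat) (t.takeWhile (· == cat) ++ t.dropWhile (· == cat))
    rw [set_update_append]
    congr 1
    rw [set_update_absorb (PySem.Set.add d.keys cat) _ cat
      (fun x hx => by simpa using List.mem_takeWhile_imp hx)
      (by unfold PySem.Set.add; split_ifs with h
          · simpa [List.contains_iff_mem] using h
          · simp)]

theorem getD_scanB : ∀ (l : List Int) (d : PySem.Dict Int (List String)) (i : Int) (c : Int),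
    (scanB d i l).getD c [] = d.getD c [] ++ (runsOf c i l).map (fun r => renderSeg r.1 r.2) := by
  intro l d i c
  fun_induction scanB d i l with
  | case1 d i => simp [runsOf]
  | case2 d i cat t j ih =>
    rw [ih]
    show _ = d.getD c [] ++ (runsOf c i (cat :: t)).map (fun r => renderSeg r.1 r.2)
    have hruns : runsOf c i (cat :: t)
        = (if cat = c then [(i, j)] else []) ++ runsOf c (j + 1) (t.dropWhile (· == cat)) := by
      rw [runsOf]
      by_cases hc : cat = c
      · rw [if_pos hc, if_pos hc]
        rfl
      · rw [if_neg hc, if_neg hc]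
        rfl
    rw [hruns]
    rw [PySem.Dict.getD_modify]
    by_cases h : c = cat
    · subst h
      rw [if_pos rfl, if_pos rfl, PySem.Dict.getD_setdefault_self]
      simp
    · rw [if_neg h, if_neg (fun hh => h hh.symm)]
      have : (d.setdefault cat []).getD c [] = d.getD c [] := by
        unfold PySem.Dict.getD
        rw [PySem.Dict.get?_setdefault_of_ne (hne := h)]
      rw [this]
      simp

theorem nodup_keys_scanB (l : List Int) (d : PySem.Dict Int (List String)) (i : Int)
    (h : d.keys.Nodup) : (scanB d i l).keys.Nodup := by
  rw [keys_scanB]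
  exact PySem.Set.nodup_update _ _ h

-- ---------- per-category string ----------

-- A's per-category string
def aperStr (lst : List Int) : String :=
  PySem.Str.join "_"
    (if lst.length = 0 then ["NULL"]
     else ((PySem.List.enumerate lst).foldl (bodyA lst)
       ((none, none, []) : Option Int × Option Int × List String)).2.2)

theorem aperStr_eq (lst : List Int) (hp : lst.Pairwise (· < ·)) :
    aperStr lst
      = (if (goBIdx lst).map (fun r => renderSeg r.1 r.2) = [] then "NULL"
         else PySem.Str.join "_" ((goBIdx lst).map (fun r => renderSeg r.1 r.2))) := by
  unfold aperStr
  cases lst with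
  | nil => simp [goBIdx, join_single]
  | cons x rest =>
    rw [if_neg (by simp)]
    have hb := foldA_eq_goA (x :: rest) (x :: rest) 0 none [] (by simp)
    simp only [Nat.cast_zero] at hb
    rw [hb, goA_none]
    have := goA_eq_goB rest x x [] (List.isChain_iff_pairwise.mpr hp)
    simp only [List.map_nil] at this
    rw [this]
    show _ = (if (goB [] x x rest).map (fun r => renderSeg r.1 r.2) = [] then "NULL" else _)
    rw [if_neg (by simp [goB_ne_nil])]
    rfl

-- ===== VERDICT (by name: the statement is the Claim_ definition above) =====
theorem category2string_spec : Claim_equal_category2string := by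
  unfold Claim_equal_category2string
  intro catlist _ hpre
  unfold Spec_category2string
  obtain ⟨m, hm⟩ : ∃ m, PySem.List.max? catlist (fun x => x) = some m := by
    cases h : PySem.List.max? catlist (fun x => x) with
    | none => exact absurd ((PySem.List.max?_eq_none_iff catlist _).mp h) hpre
    | some m => exact ⟨m, rfl⟩
  -- A's value
  have hA : category2string catlist
      = PySem.Str.join "," ((phase1 catlist m).keys.map (fun c => aperStr ((phase1 catlist m).getD c []))) := by
    unfold category2string
    rw [hm]
    show PySem.Str.join "," ((fun d => d.keys.foldl (fun out cat =>
        out ++ [PySem.Str.join "_"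
          (if (d.getD cat []).length = 0 then ["NULL"]
           else ((PySem.List.enumerate (d.getD cat [])).foldl (bodyA (d.getD cat []))
             ((none, none, []) : Option Int × Option Int × List String)).2.2)]) ([] : List String))
        ((PySem.Set.ofList catlist).foldl
          (fun d cat => d.modify cat [] (fun l => PySem.List.sorted l (fun x => x)))
          (List.foldl (fun d p =>
            let d := if d.contains p.2 then d else d.insert p.2 []
            d.modify p.2 [] (fun l => l ++ [p.1])) (initDict Int m) (PySem.List.enumerate catlist)))) = _
    rw [stepA_eq]
    show PySem.Str.join "," ((fun d => d.keys.foldl (fun out cat =>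
        out ++ [PySem.Str.join "_"
          (if (d.getD cat []).length = 0 then ["NULL"]
           else ((PySem.List.enumerate (d.getD cat [])).foldl (bodyA (d.getD cat []))
             ((none, none, []) : Option Int × Option Int × List String)).2.2)]) ([] : List String))
        ((PySem.Set.ofList catlist).foldl
          (fun d cat => d.modify cat [] (fun l => PySem.List.sorted l (fun x => x)))
          (phase1 catlist m))) = _
    rw [sortfold_id]
    show PySem.Str.join "," ((phase1 catlist m).keys.foldl (fun out cat =>
        out ++ [aperStr ((phase1 catlist m).getD cat [])]) ([] : List String)) = _
    rw [PySem.List.foldl_append_singleton_eq_map (fun cat => aperStr ((phase1 catlist m).getD cat []))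
      (phase1 catlist m).keys []]
    rfl
  -- B's value
  have hB : category2string_alt catlist
      = PySem.Str.join "," ((scanB (initDict String m) 0 catlist).keys.map
          (fun c => let v := (scanB (initDict String m) 0 catlist).getD c []
                    if v = [] then "NULL" else PySem.Str.join "_" v)) := by
    unfold category2string_alt
    rw [hm]
    show PySem.Str.join "," ((scanB (initDict String m) 0 catlist).values.map
        (fun v => if v = [] then "NULL" else PySem.Str.join "_" v)) = _
    rw [PySem.Dict.values_eq_map_keys (scanB (initDict String m) 0 catlist)
      (nodup_keys_scanB catlist _ 0
        (PySem.Dict.nodup_keys_foldl_insert _ (fun _ _ => []) _ PySem.Dict.nodup_keys_empty)) []]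
    rw [List.map_map]
    rfl
  rw [hA, hB]
  -- the two dicts have the same key list
  have hkeys : (phase1 catlist m).keys = (scanB (initDict String m) 0 catlist).keys := by
    rw [keys_phase1, keys_scanB, keys_initDict]
  rw [hkeys]
  congr 1
  apply List.map_congr_left
  intro c _
  have hv : (scanB (initDict String m) 0 catlist).getD c []
      = (runsOf c 0 catlist).map (fun r => renderSeg r.1 r.2) := by
    rw [getD_scanB]
    have : (initDict String m).getD c [] = [] := by
      unfold initDict
      have hgen : ∀ (l : List Int) (d : PySem.Dict Int (List String)),
          (∀ c, d.getD c [] = ([] : List String)) →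
          ∀ c, (l.foldl (fun d i => d.insert i ([] : List String)) d).getD c [] = [] := by
        intro l
        induction l with
        | nil => intro d h c; exact h c
        | cons i t ih =>
          intro d h c
          refine ih _ (fun c => ?_) c
          by_cases hc : c = i
          · subst hc; exact PySem.Dict.getD_insert_self d c [] []
          · rw [PySem.Dict.getD_insert_of_ne (hne := hc)]
            exact h c
      exact hgen _ _ (fun c => by simp [PySem.Dict.getD]) c
    rw [this, List.nil_append]
  show aperStr ((phase1 catlist m).getD c []) = _
  rw [getD_phase1, aperStr_eq (idxOf c 0 catlist) (pairwise_idxOf catlist c), hv,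
    goBIdx_idxOf c 0 catlist]
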